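-- pv_equiv track=rewrite | github.com/hectormr206/lifeos | image/files/usr/local/bin/lifeos-diarize.py | assign_speakers_to_transcript
-- ===== SOURCE A (Python) =====
-- def assign_speakers_to_transcript(transcript_text, speaker_changes, segment_ms=2000):
--     """Assign speaker labels to transcript lines based on detected changes."""
--     lines = [l.strip() for l in transcript_text.split("\n") if l.strip()]
--
--     if not lines:
--         return transcript_text
--
--     if not speaker_changes or len(speaker_changes) <= 1:
--         # No speaker changes detected, single speaker
--         return "\n".join(f"[Speaker 1] {line}" for line in lines)
--
--     # Distribute lines across speaker turns
--     n_turns = len(speaker_changes)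
--     lines_per_turn = max(1, len(lines) // n_turns)
--
--     result = []
--     current_speaker = 1
--     speaker_map = {}  # track which energy pattern -> speaker number
--     next_speaker = 2
--
--     for i, line in enumerate(lines):
--         turn_idx = min(i // lines_per_turn, n_turns - 1)
--
--         # Alternate speakers at each detected change
--         if turn_idx not in speaker_map:
--             if turn_idx == 0:
--                 speaker_map[turn_idx] = 1
--             else:
--                 # Alternate between speakers (simple 2-speaker model)
--                 prev = speaker_map.get(turn_idx - 1, 1)
--                 speaker_map[turn_idx] = 1 if prev == 2 else 2
--
--         speaker = speaker_map[turn_idx]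
--         result.append(f"[Speaker {speaker}] {line}")
--
--     return "\n".join(result)
-- ===== SOURCE B (Python) =====
-- def assign_speakers_to_transcript(transcript_text, speaker_changes, segment_ms=2000):
--     """Assign speaker labels to transcript lines based on detected changes."""
--     lines = [s for s in map(str.strip, transcript_text.split("\n")) if s]
--
--     if not lines:
--         return transcript_text
--
--     if len(speaker_changes) <= 1:
--         # Single speaker throughout
--         return "\n".join("[Speaker 1] " + line for line in lines)
--
--     # Two-speaker alternation: turn index advances one step at a time, so the
--     # speaker of a turn is determined directly by the turn's parity.
--     n_turns = len(speaker_changes)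
--     lines_per_turn = max(1, len(lines) // n_turns)
--     return "\n".join(
--         f"[Speaker {1 + (min(i // lines_per_turn, n_turns - 1) & 1)}] {line}"
--         for i, line in enumerate(lines)
--     )
-- ===== Notes on version B (the rewrite author's own statement) =====
-- stated objective: simpler
-- what changed: The stateful speaker_map dict and its alternation logic are replaced by a closed-form parity formula (turn index never skips a value, so the turn's speaker is 1 + (turn_idx & 1)), emitted in a single comprehension over enumerate(lines).
import Mathlib
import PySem

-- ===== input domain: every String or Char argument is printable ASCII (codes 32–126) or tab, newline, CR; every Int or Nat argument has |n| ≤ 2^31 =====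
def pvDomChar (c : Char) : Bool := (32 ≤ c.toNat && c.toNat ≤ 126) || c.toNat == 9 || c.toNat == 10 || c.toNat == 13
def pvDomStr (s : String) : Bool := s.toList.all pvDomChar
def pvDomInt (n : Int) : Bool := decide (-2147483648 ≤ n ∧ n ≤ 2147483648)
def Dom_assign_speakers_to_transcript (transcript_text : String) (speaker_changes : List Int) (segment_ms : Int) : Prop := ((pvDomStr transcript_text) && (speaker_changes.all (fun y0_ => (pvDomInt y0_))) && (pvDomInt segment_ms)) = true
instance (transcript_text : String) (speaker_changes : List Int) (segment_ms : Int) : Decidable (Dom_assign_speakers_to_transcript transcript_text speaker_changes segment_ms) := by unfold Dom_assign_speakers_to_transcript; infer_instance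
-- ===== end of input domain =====

-- B replaces A's stateful speaker_map dict by the closed-form parity 1 + (turn_idx & 1); objective: simpler.

-- ===== PORT A =====
-- the for-loop of A: state = (index i, speaker_map); result list built in order
-- (speaker_map[turn_idx] after the fill-in is always present; ported as getD _ 0)
def pvLoopA (lpt n : Int) : List String → Int → PySem.Dict Int Int → List String
  | [], _, _ => []
  | line :: rest, i, m =>
    let turn_idx := min (PySem.Int.floordiv i lpt) (n - 1)
    let m' :=
      if m.contains turn_idx then m
      else if turn_idx = 0 then m.insert 0 1
      else m.insert turn_idx (if m.getD (turn_idx - 1) 1 = 2 then 1 else 2)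
    ("[Speaker " ++ PySem.Int.toStr (m'.getD turn_idx 0) ++ "] " ++ line)
      :: pvLoopA lpt n rest (i + 1) m'

def assign_speakers_to_transcript (transcript_text : String) (speaker_changes : List Int) (segment_ms : Int) : String :=
  -- split("\n") with a nonempty literal separator never raises: split? is some here
  let lines := ((PySem.Str.split? transcript_text "\n").getD []).filterMap
      (fun l => let s := PySem.Str.strip l; if s = "" then none else some s)
  if lines = [] then transcript_text
  else if speaker_changes = [] ∨ speaker_changes.length ≤ 1 then
    PySem.Str.join "\n" (lines.map (fun line => "[Speaker 1] " ++ line))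
  else
    let n_turns : Int := speaker_changes.length
    let lines_per_turn : Int := max 1 (PySem.Int.floordiv (lines.length : Int) n_turns)
    PySem.Str.join "\n" (pvLoopA lines_per_turn n_turns lines 0 PySem.Dict.empty)

-- ===== PORT B =====
def assign_speakers_to_transcript_alt (transcript_text : String) (speaker_changes : List Int) (segment_ms : Int) : String :=
  let lines := (((PySem.Str.split? transcript_text "\n").getD []).map PySem.Str.strip).filter (fun s => s ≠ "")
  if lines = [] then transcript_text
  else if speaker_changes.length ≤ 1 then
    PySem.Str.join "\n" (lines.map (fun line => "[Speaker 1] " ++ line))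
  else
    let n_turns : Int := speaker_changes.length
    let lines_per_turn : Int := max 1 (PySem.Int.floordiv (lines.length : Int) n_turns)
    PySem.Str.join "\n" ((PySem.List.enumerate lines 0).map (fun p =>
      "[Speaker " ++
        PySem.Int.toStr (1 + PySem.Int.band (min (PySem.Int.floordiv p.1 lines_per_turn) (n_turns - 1)) 1) ++
      "] " ++ p.2))

-- ===== PRECONDITION & SPEC =====
def Spec_assign_speakers_to_transcript (transcript_text : String) (speaker_changes : List Int) (segment_ms : Int) (out : String) : Prop := out = assign_speakers_to_transcript_alt transcript_text speaker_changes segment_ms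
instance (transcript_text : String) (speaker_changes : List Int) (segment_ms : Int) (out : String) : Decidable (Spec_assign_speakers_to_transcript transcript_text speaker_changes segment_ms out) := by unfold Spec_assign_speakers_to_transcript; infer_instance

-- ===== CLAIM (what is proved, stated in full; the proofs are below) =====
def Claim_equal_assign_speakers_to_transcript : Prop := ∀ (transcript_text : String) (speaker_changes : List Int) (segment_ms : Int), Dom_assign_speakers_to_transcript transcript_text speaker_changes segment_ms → Spec_assign_speakers_to_transcript transcript_text speaker_changes segment_ms (assign_speakers_to_transcript transcript_text speaker_changes segment_ms)

-- ===== LEMMAS AND PROOFS =====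

-- the two line-extraction styles agree
lemma pvLines_eq (xs : List String) :
    xs.filterMap (fun l => let s := PySem.Str.strip l; if s = "" then none else some s)
      = (xs.map PySem.Str.strip).filter (fun s => s ≠ "") := by
  induction xs with
  | nil => rfl
  | cons x xs ih =>
    simp only [List.filterMap_cons, List.map_cons, List.filter_cons]
    by_cases h : PySem.Str.strip x = "" <;> simp [h, ih]

-- Nat-level turn index and its one-step behaviour
def pvT (L N i : Nat) : Nat := min (i / L) (N - 1)

lemma pvT_step (L N : Nat) (i : Nat) :
    pvT L N i = pvT L N (i - 1) ∨ pvT L N i = pvT L N (i - 1) + 1 := by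
  rcases i with _ | j
  · simp [pvT]
  · have h1 : j / L ≤ (j + 1) / L := Nat.div_le_div_right (by omega)
    have h2 : (j + 1) / L ≤ j / L + 1 := by
      rw [Nat.succ_div]
      split <;> omega
    simp only [pvT, Nat.add_sub_cancel]
    omega

lemma pvT_mono (L N : Nat) (i : Nat) : pvT L N (i - 1) ≤ pvT L N i := by
  have := Nat.div_le_div_right (c := L) (show i - 1 ≤ i by omega)
  simp only [pvT]; omega

-- the invariant the speaker_map satisfies before processing index i
def pvInv (L N i : Nat) (m : PySem.Dict Int Int) : Prop :=
  ∀ k : Int, m.get? k =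
    if 0 < i ∧ 0 ≤ k ∧ k ≤ ((pvT L N (i - 1) : Nat) : Int)
    then some (1 + PySem.Int.mod k 2) else none

lemma pvCastT (L N : Nat) (hN : 2 ≤ N) (i : Nat) :
    min (PySem.Int.floordiv (i : Int) (L : Int)) ((N : Int) - 1)
      = ((pvT L N i : Nat) : Int) := by
  rw [PySem.Int.floordiv_natCast]
  have : ((N : Int) - 1) = ((N - 1 : Nat) : Int) := by omega
  rw [this, pvT, Nat.cast_min]

lemma pvMod_cast (k : Nat) : PySem.Int.mod (k : Int) 2 = ((k % 2 : Nat) : Int) := by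
  exact_mod_cast PySem.Int.mod_natCast k 2

-- main loop lemma: A's dict loop produces exactly B's parity labels
lemma pvLoopA_eq (L N : Nat) (hN : 2 ≤ N) :
    ∀ (ls : List String) (i : Nat) (m : PySem.Dict Int Int), pvInv L N i m →
      pvLoopA (L : Int) (N : Int) ls (i : Int) m
        = (PySem.List.enumerate ls (i : Int)).map (fun p =>
            "[Speaker " ++
              PySem.Int.toStr (1 + PySem.Int.band (min (PySem.Int.floordiv p.1 (L : Int)) ((N : Int) - 1)) 1) ++
            "] " ++ p.2) := by
  intro ls
  induction ls with
  | nil => intro i m _; simp [pvLoopA, PySem.List.enumerate_nil]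
  | cons line rest ih =>
    intro i m hm
    simp only [pvInv] at hm
    rw [pvLoopA, PySem.List.enumerate_cons, List.map_cons]
    rw [pvCastT L N hN i]
    have hband : ∀ a : Int, PySem.Int.band a 1 = PySem.Int.mod a 2 := PySem.Int.band_one
    have hcont : m.contains ((pvT L N i : Nat) : Int)
        = decide (0 < i ∧ pvT L N i ≤ pvT L N (i - 1)) := by
      rw [PySem.Dict.contains_eq_isSome_get?, hm]
      by_cases h : 0 < i ∧ (0:Int) ≤ ((pvT L N i : Nat) : Int) ∧ ((pvT L N i : Nat) : Int) ≤ ((pvT L N (i-1) : Nat) : Int)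
      · simp only [if_pos h, Option.isSome_some]
        have : 0 < i ∧ pvT L N i ≤ pvT L N (i-1) := ⟨h.1, by exact_mod_cast h.2.2⟩
        simp [this]
      · simp only [if_neg h, Option.isSome_none]
        have : ¬ (0 < i ∧ pvT L N i ≤ pvT L N (i-1)) := by
          intro hc
          exact h ⟨hc.1, Int.natCast_nonneg _, by exact_mod_cast hc.2⟩
        simp [this]
    by_cases hc : 0 < i ∧ pvT L N i ≤ pvT L N (i - 1)
    · -- key already present: map unchanged, speaker read from the invariant
      have hTeq : pvT L N i = pvT L N (i - 1) := le_antisymm hc.2 (pvT_mono L N i)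
      rw [hcont]
      simp only [hc, and_self, decide_true, if_true]
      have hget : m.get? ((pvT L N i : Nat) : Int) = some (1 + PySem.Int.mod ((pvT L N i : Nat) : Int) 2) := by
        rw [hm]
        have : 0 < i ∧ (0:Int) ≤ ((pvT L N i : Nat) : Int) ∧ ((pvT L N i : Nat) : Int) ≤ ((pvT L N (i-1) : Nat) : Int) :=
          ⟨hc.1, Int.natCast_nonneg _, by exact_mod_cast hc.2⟩
        simp [this]
      have hgd := PySem.Dict.getD_of_get?_eq_some m 0 hget
      have hrest : pvInv L N (i + 1) m := by
        simp only [pvInv, Nat.add_sub_cancel, hTeq]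
        intro k
        rw [hm]
        have heq : (0 < i + 1 ∧ 0 ≤ k ∧ k ≤ ((pvT L N (i-1) : Nat) : Int))
            ↔ (0 < i ∧ 0 ≤ k ∧ k ≤ ((pvT L N (i-1) : Nat) : Int)) := by
          constructor
          · rintro ⟨_, h2, h3⟩; exact ⟨hc.1, h2, h3⟩
          · rintro ⟨_, h2, h3⟩; exact ⟨by omega, h2, h3⟩
        rw [if_congr heq rfl rfl]
      have htail := ih (i + 1) m hrest
      push_cast at htail
      rw [hgd, htail, hband]
    · -- key absent
      rw [hcont]
      simp only [hc, decide_false, Bool.false_eq_true, if_false]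
      by_cases hi : i = 0
      · -- very first line: turn 0 is opened with speaker 1
        subst hi
        have hT0 : pvT L N 0 = 0 := by simp [pvT]
        rw [hT0]
        simp only [Nat.cast_zero, if_true]
        have hgd := PySem.Dict.getD_insert_self m (0:Int) (1:Int) 0
        have hrest : pvInv L N 1 (m.insert 0 1) := by
          simp only [pvInv]
          intro k
          rw [PySem.Dict.get?_insert, hm]
          have h10 : (1 : Nat) - 1 = 0 := rfl
          rw [h10, hT0]
          by_cases hk : k = (0 : Int)
          · subst hk
            have : (0 < 1 ∧ (0:Int) ≤ 0 ∧ (0:Int) ≤ ((0:Nat):Int)) := by norm_num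
            simp [this]
          · simp only [if_neg hk]
            have h1 : ¬ (0 < 0 ∧ 0 ≤ k ∧ k ≤ (((0:Nat)):Int)) := by omega
            have h2 : ¬ (0 < 1 ∧ 0 ≤ k ∧ k ≤ (((0:Nat)):Int)) := by omega
            rw [if_neg h1, if_neg h2]
        have htail := ih 1 (m.insert 0 1) hrest
        push_cast at htail
        rw [hgd, show ((0:Int) + 1) = 1 from by norm_num, htail, hband,
          show PySem.Int.mod 0 2 = 0 from by decide]
        norm_num
      · -- later line opening a NEW turn: the turn index advanced by exactly one
        have hi' : 0 < i := by omega
        have hstep : pvT L N i = pvT L N (i - 1) + 1 := by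
          rcases pvT_step L N i with h | h
          · exact absurd ⟨hi', le_of_eq h⟩ hc
          · exact h
        have htne : ((pvT L N i : Nat) : Int) ≠ 0 := by
          rw [hstep]; push_cast; omega
        rw [if_neg htne]
        have hprev : m.getD (((pvT L N i : Nat) : Int) - 1) 1
            = 1 + PySem.Int.mod ((pvT L N (i - 1) : Nat) : Int) 2 := by
          have he : ((pvT L N i : Nat) : Int) - 1 = ((pvT L N (i - 1) : Nat) : Int) := by
            rw [hstep]; push_cast; ring
          rw [he]
          refine PySem.Dict.getD_of_get?_eq_some m 1 ?_
          rw [hm]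
          have : 0 < i ∧ (0:Int) ≤ ((pvT L N (i-1) : Nat) : Int) ∧ ((pvT L N (i-1) : Nat) : Int) ≤ ((pvT L N (i-1) : Nat) : Int) :=
            ⟨hi', Int.natCast_nonneg _, le_refl _⟩
          simp [this]
        rw [hprev]
        set v : Int := if 1 + PySem.Int.mod ((pvT L N (i - 1) : Nat) : Int) 2 = 2 then 1 else 2 with hv
        have hval : v = 1 + PySem.Int.mod ((pvT L N i : Nat) : Int) 2 := by
          rw [hv, hstep, pvMod_cast, pvMod_cast]
          rcases Nat.mod_two_eq_zero_or_one (pvT L N (i-1)) with h | h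
          · have h2 : (pvT L N (i-1) + 1) % 2 = 1 := by omega
            rw [h, h2]; norm_num
          · have h2 : (pvT L N (i-1) + 1) % 2 = 0 := by omega
            rw [h, h2]; norm_num
        have hgd := PySem.Dict.getD_insert_self m ((pvT L N i : Nat) : Int) v 0
        have hrest : pvInv L N (i + 1) (m.insert ((pvT L N i : Nat) : Int) v) := by
          simp only [pvInv, Nat.add_sub_cancel]
          intro k
          rw [PySem.Dict.get?_insert, hm]
          by_cases hk : k = ((pvT L N i : Nat) : Int)
          · subst hk
            have : (0 < i + 1 ∧ (0:Int) ≤ ((pvT L N i : Nat) : Int) ∧ ((pvT L N i : Nat) : Int) ≤ ((pvT L N i : Nat) : Int)) :=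
              ⟨by omega, Int.natCast_nonneg _, le_refl _⟩
            simp [this, hval]
          · simp only [if_neg hk]
            have hc1 : (((pvT L N (i-1) : Nat)) : Int) = ((pvT L N i : Nat) : Int) - 1 := by
              rw [hstep]; push_cast; ring
            have heq : (0 < i ∧ 0 ≤ k ∧ k ≤ ((pvT L N (i-1) : Nat) : Int))
                ↔ (0 < i + 1 ∧ 0 ≤ k ∧ k ≤ ((pvT L N i : Nat) : Int)) := by
              rw [hc1]
              constructor
              · rintro ⟨_, h2, h3⟩; exact ⟨by omega, h2, by omega⟩
              · rintro ⟨_, h2, h3⟩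
                refine ⟨hi', h2, ?_⟩
                omega
            rw [if_congr heq rfl rfl]
        have htail := ih (i + 1) (m.insert ((pvT L N i : Nat) : Int) v) hrest
        push_cast at htail
        rw [hgd, htail, hband, hval]

lemma pvInv_zero (L N : Nat) : pvInv L N 0 PySem.Dict.empty := by
  simp only [pvInv]
  intro k
  simp [PySem.Dict.get?_empty]

-- ===== VERDICT (by name: the statement is the Claim_ definition above) =====
theorem assign_speakers_to_transcript_spec : Claim_equal_assign_speakers_to_transcript := by
  intro transcript_text speaker_changes segment_ms _
  unfold Spec_assign_speakers_to_transcript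
  unfold assign_speakers_to_transcript assign_speakers_to_transcript_alt
  rw [pvLines_eq]
  set lines := ((((PySem.Str.split? transcript_text "\n").getD []).map PySem.Str.strip)).filter (fun s => s ≠ "") with hlines
  by_cases h0 : lines = []
  · simp [h0]
  · simp only [if_neg h0]
    by_cases h1 : speaker_changes = [] ∨ speaker_changes.length ≤ 1
    · have h1' : speaker_changes.length ≤ 1 := by
        rcases h1 with h | h
        · simp [h]
        · exact h
      simp [h1']
    · have h1' : ¬ speaker_changes.length ≤ 1 := fun hle => h1 (Or.inr hle)
      simp only [if_neg h1, if_neg h1']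
      have hN : 2 ≤ speaker_changes.length := by omega
      have hmax : max 1 (PySem.Int.floordiv (lines.length : Int) (speaker_changes.length : Int))
          = ((max 1 (lines.length / speaker_changes.length) : Nat) : Int) := by
        rw [PySem.Int.floordiv_natCast, Nat.cast_max]; norm_num
      rw [hmax]
      have hmain := pvLoopA_eq (max 1 (lines.length / speaker_changes.length)) speaker_changes.length
        hN lines 0 PySem.Dict.empty (pvInv_zero _ _)
      simp only [Nat.cast_zero] at hmain
      rw [hmain]
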